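-- pv_equiv track=rewrite | github.com/Gioppyy/unipr_exercises | 2025/esercizi/matrici/2.py | smooth2
-- ===== SOURCE A (Python) =====
-- def smooth2(mtx: list, rows: int, cols: int) -> list:
--     smoothed = [0] * rows*cols
--
--     for i in range(rows):
--         for j in range(cols):
--             total = mtx[i*cols + j]
--             count = 1
--
--             dirs = [(-1, 0), (1, 0), (0, -1), (0, 1)]
--             for di, dj in dirs:
--                 ni, nj = i + di, j + dj
--                 if 0 <= ni < rows and 0 <= nj < cols:
--                     total += mtx[ni*cols + nj]
--                     count += 1
--
--             smoothed[i*cols + j] = total // count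
--
--     return smoothed
-- ===== SOURCE B (Python) =====
-- def smooth2(mtx: list, rows: int, cols: int) -> list:
--     total = [mtx[i * cols + j] for i in range(rows) for j in range(cols)]
--     count = [1] * len(total)
--     for i in range(rows):
--         for j in range(cols):
--             c = i * cols + j
--             v = mtx[c]
--             if i > 0:
--                 total[c - cols] += v
--                 count[c - cols] += 1
--             if i < rows - 1:
--                 total[c + cols] += v
--                 count[c + cols] += 1
--             if j > 0:
--                 total[c - 1] += v
--                 count[c - 1] += 1
--             if j < cols - 1:
--                 total[c + 1] += v
--                 count[c + 1] += 1
--     return [t // k for t, k in zip(total, count)]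
-- ===== Notes on version B (the rewrite author's own statement) =====
-- stated objective: alternative
-- what changed: B replaces A's per-cell gather (inner loop over a direction list reading neighbors) by a scatter pass: it builds total/count accumulator arrays seeded with each cell's own value, pushes each source cell's value outward to its in-bounds neighbors in one sweep, and divides at the end.
import Mathlib
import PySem

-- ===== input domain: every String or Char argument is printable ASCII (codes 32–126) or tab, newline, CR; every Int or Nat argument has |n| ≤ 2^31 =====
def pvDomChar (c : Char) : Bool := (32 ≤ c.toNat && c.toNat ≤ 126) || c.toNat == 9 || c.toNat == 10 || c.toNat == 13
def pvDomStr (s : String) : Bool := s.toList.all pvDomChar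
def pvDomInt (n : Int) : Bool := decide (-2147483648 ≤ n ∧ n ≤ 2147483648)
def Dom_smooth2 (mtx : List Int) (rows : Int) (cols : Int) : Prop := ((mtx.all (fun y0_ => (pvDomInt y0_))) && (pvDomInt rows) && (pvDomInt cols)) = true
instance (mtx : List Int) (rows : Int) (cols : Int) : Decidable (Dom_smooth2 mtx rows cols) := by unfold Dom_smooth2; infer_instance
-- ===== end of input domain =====

-- B replaces A's per-cell gather (inner direction-list loop reading neighbors) by a scatter pass
-- with total/count accumulator arrays and a final division: an alternative of the same cost.


-- ===== PORT A =====
def smooth2 (mtx : List Int) (rows : Int) (cols : Int) : List Int :=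
  (PySem.List.pyRange 0 rows 1).foldl (fun sm i =>
    (PySem.List.pyRange 0 cols 1).foldl (fun sm j =>
      let tc :=
        ([((-1 : Int), (0 : Int)), (1, 0), (0, -1), (0, 1)]).foldl
          (fun (tc : Int × Int) d =>
            let ni := i + d.1
            let nj := j + d.2
            if 0 ≤ ni ∧ ni < rows ∧ 0 ≤ nj ∧ nj < cols then
              (tc.1 + PySem.List.pyGetD mtx (ni * cols + nj) 0, tc.2 + 1)
            else tc)
          (PySem.List.pyGetD mtx (i * cols + j) 0, 1)
      PySem.List.pySetD sm (i * cols + j) (PySem.Int.floordiv tc.1 tc.2)) sm)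
    (List.replicate (rows.toNat * cols.toNat) 0)

-- ===== PORT B =====
def pvBump (st : List Int × List Int) (t : Int) (v : Int) : List Int × List Int :=
  (PySem.List.pySetD st.1 t (PySem.List.pyGetD st.1 t 0 + v),
   PySem.List.pySetD st.2 t (PySem.List.pyGetD st.2 t 0 + 1))

def smooth2_alt (mtx : List Int) (rows : Int) (cols : Int) : List Int :=
  let total0 := (PySem.List.pyRange 0 rows 1).flatMap
    (fun i => (PySem.List.pyRange 0 cols 1).map (fun j => PySem.List.pyGetD mtx (i * cols + j) 0))
  let count0 : List Int := List.replicate total0.length 1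
  let st :=
    (PySem.List.pyRange 0 rows 1).foldl (fun st i =>
      (PySem.List.pyRange 0 cols 1).foldl (fun st j =>
        let c := i * cols + j
        let v := PySem.List.pyGetD mtx c 0
        let st := if i > 0 then pvBump st (c - cols) v else st
        let st := if i < rows - 1 then pvBump st (c + cols) v else st
        let st := if j > 0 then pvBump st (c - 1) v else st
        let st := if j < cols - 1 then pvBump st (c + 1) v else st
        st) st) (total0, count0)
  List.zipWith (fun t k => PySem.Int.floordiv t k) st.1 st.2

-- ===== PRECONDITION & SPEC =====
-- Pre_ excludes exactly the inputs where A raises IndexError: positive dimensions with a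
-- matrix shorter than rows*cols.
def Pre_smooth2 (mtx : List Int) (rows : Int) (cols : Int) : Prop :=
  0 < rows → 0 < cols → rows * cols ≤ (mtx.length : Int)
instance (mtx : List Int) (rows : Int) (cols : Int) : Decidable (Pre_smooth2 mtx rows cols) := by
  unfold Pre_smooth2; infer_instance

def pvWitness_smooth2 : List Int × Int × Int := ([1, 2, 3, 4, 5, 6], 2, 3)

def Spec_smooth2 (mtx : List Int) (rows : Int) (cols : Int) (out : List Int) : Prop := out = smooth2_alt mtx rows cols
instance (mtx : List Int) (rows : Int) (cols : Int) (out : List Int) : Decidable (Spec_smooth2 mtx rows cols out) := by unfold Spec_smooth2; infer_instance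

-- ===== CLAIM (what is proved, stated in full; the proofs are below) =====
def Claim_equal_smooth2 : Prop := ∀ (mtx : List Int) (rows : Int) (cols : Int), Dom_smooth2 mtx rows cols → Pre_smooth2 mtx rows cols → Spec_smooth2 mtx rows cols (smooth2 mtx rows cols)

-- ===== LEMMAS AND PROOFS =====

-- row/column arithmetic for linear indices
lemma fd_rowcol (cols i j : Int) (h : 0 < cols) (hj : 0 ≤ j) (hjc : j < cols) :
    PySem.Int.floordiv (i * cols + j) cols = i ∧ PySem.Int.mod (i * cols + j) cols = j := by
  have hfd : PySem.Int.floordiv (i * cols + j) cols = i := by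
    rw [PySem.Int.floordiv_eq_iff_of_pos (hb := h)]
    constructor <;> nlinarith
  refine ⟨hfd, ?_⟩
  have := PySem.Int.floordiv_mul_add_mod (i * cols + j) cols
  rw [hfd] at this; linarith

lemma rowcol_inj (cols a b x y : Int) (hc : 0 < cols) (hx : 0 ≤ x) (hxc : x < cols)
    (hy : 0 ≤ y) (hyc : y < cols) (h : a * cols + x = b * cols + y) : a = b ∧ x = y := by
  have h1 := (fd_rowcol cols a x hc hx hxc).1
  have h2 := (fd_rowcol cols b y hc hy hyc).1
  have h3 := (fd_rowcol cols a x hc hx hxc).2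
  have h4 := (fd_rowcol cols b y hc hy hyc).2
  rw [h] at h1 h3
  constructor
  · rw [← h1, h2]
  · rw [← h3, h4]

lemma src_facts (rows cols P : Int) (hc : 0 < cols) (h0 : 0 ≤ P) (hN : P < rows * cols) :
    0 ≤ PySem.Int.floordiv P cols ∧ PySem.Int.floordiv P cols < rows ∧
    0 ≤ PySem.Int.mod P cols ∧ PySem.Int.mod P cols < cols ∧
    PySem.Int.floordiv P cols * cols + PySem.Int.mod P cols = P := by
  have h1 : 0 ≤ PySem.Int.mod P cols := PySem.Int.mod_nonneg P hc
  have h2 : PySem.Int.mod P cols < cols := PySem.Int.mod_lt P hc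
  have h3 := PySem.Int.floordiv_mul_add_mod P cols
  have h4 : 0 ≤ PySem.Int.floordiv P cols := by
    rw [PySem.Int.le_floordiv_iff_mul_le (hb := hc)]; omega
  have h5 : PySem.Int.floordiv P cols < rows := by
    rw [PySem.Int.floordiv_lt_iff_lt_mul (hb := hc)]; nlinarith
  exact ⟨h4, h5, h1, h2, h3⟩

-- turning both nested i/j loops into one loop over linear cell indices

lemma row_seg {σ : Type} (cols : Int) (hc : 0 < cols) (f : σ → Int → Int → σ) (R : Int) :
    ∀ (J : Nat), (J : Int) ≤ cols → ∀ (st : σ),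
      (PySem.List.pyRange 0 J 1).foldl (fun st j => f st R j) st
      = (PySem.List.pyRange (R * cols) (R * cols + J) 1).foldl
          (fun st s => f st (PySem.Int.floordiv s cols) (PySem.Int.mod s cols)) st := by
  intro J
  induction J with
  | zero => intro _ st; simp [PySem.List.pyRange_one_eq_nil (le_refl (R * cols))]
  | succ n ih =>
    intro hJ st
    have h1 : ((n : Int)) ≤ cols := by push_cast at hJ ⊢; omega
    have e1 : ((n + 1 : Nat) : Int) = (n : Int) + 1 := by push_cast; ring
    rw [e1, PySem.List.pyRange_one_succ_right (by omega)]
    have e2 : R * cols + ((n : Int) + 1) = (R * cols + n) + 1 := by ring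
    rw [e2, PySem.List.pyRange_one_succ_right (by omega)]
    rw [List.foldl_append, List.foldl_append, ih h1]
    simp only [List.foldl]
    obtain ⟨hfd, hmd⟩ := fd_rowcol cols R n hc (by omega) (by push_cast at hJ; omega)
    rw [hfd, hmd]

lemma nested_foldl_linear {σ : Type} (rows cols : Int) (hr : 0 ≤ rows) (hc : 0 ≤ cols)
    (f : σ → Int → Int → σ) (init : σ) :
    (PySem.List.pyRange 0 rows 1).foldl (fun st i =>
      (PySem.List.pyRange 0 cols 1).foldl (fun st j => f st i j) st) init
    = (PySem.List.pyRange 0 (rows * cols) 1).foldl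
        (fun st s => f st (PySem.Int.floordiv s cols) (PySem.Int.mod s cols)) init := by
  rcases eq_or_lt_of_le hc with hc0 | hcpos
  · simp [← hc0, PySem.List.pyRange_one_eq_nil (le_refl (0 : Int))]
  · have main : ∀ (Rn : Nat), (Rn : Int) ≤ rows →
        (PySem.List.pyRange 0 Rn 1).foldl (fun st i =>
          (PySem.List.pyRange 0 cols 1).foldl (fun st j => f st i j) st) init
        = (PySem.List.pyRange 0 ((Rn : Int) * cols) 1).foldl
            (fun st s => f st (PySem.Int.floordiv s cols) (PySem.Int.mod s cols)) init := by
      intro Rn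
      induction Rn with
      | zero => simp [PySem.List.pyRange_one_eq_nil (le_refl (0 : Int))]
      | succ n ih =>
        intro hR
        have e1 : ((n + 1 : Nat) : Int) = (n : Int) + 1 := by push_cast; ring
        rw [e1, PySem.List.pyRange_one_succ_right (by omega)]
        rw [List.foldl_append, ih (by push_cast at hR ⊢; omega)]
        have e2 : ((n : Int) + 1) * cols = (n : Int) * cols + cols := by ring
        rw [e2, PySem.List.pyRange_one_append 0 ((n : Int) * cols) ((n : Int) * cols + cols)
              (by positivity) (by omega)]
        rw [List.foldl_append]
        simp only [List.foldl]
        have := row_seg cols hcpos f (n : Int) cols.toNat (by omega)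
        rw [show ((cols.toNat : Int)) = cols by omega] at this
        exact (this _)
    have := main rows.toNat (by omega)
    rw [show ((rows.toNat : Int)) = rows by omega] at this
    exact this

-- a list modelling a function on the cell indices 0 … rows*cols-1
def Models (N : Int) (f : Int → Int) (xs : List Int) : Prop :=
  (xs.length : Int) = N ∧ ∀ c : Int, 0 ≤ c → c < N → PySem.List.pyGetD xs c 0 = f c

lemma models_congr {N : Int} {f g : Int → Int} {xs : List Int} (h : Models N f xs)
    (hfg : ∀ c : Int, 0 ≤ c → c < N → f c = g c) : Models N g xs :=
  ⟨h.1, fun c h0 h1 => (h.2 c h0 h1).trans (hfg c h0 h1)⟩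

lemma models_set {N : Int} {f : Int → Int} {xs : List Int} (h : Models N f xs)
    (t v : Int) (ht0 : 0 ≤ t) (htN : t < N) :
    Models N (fun c => if c = t then v else f c) (PySem.List.pySetD xs t v) := by
  obtain ⟨hlen, hget⟩ := h
  have hset : PySem.List.pySetD xs t v = xs.set t.toNat v := PySem.List.pySetD_of_nonneg _ _ ht0
  refine ⟨by simp [hset, hlen], ?_⟩
  intro c hc0 hcN
  have hclen : c < (xs.length : Int) := by omega
  have hcl : c.toNat < xs.length := by omega
  rw [hset, PySem.List.pyGetD_eq_getElem _ _ hc0 (by simpa using hclen)]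
  by_cases hct : c = t
  · subst hct
    simp
  · rw [List.getElem_set_ne (by omega)]
    rw [← PySem.List.pyGetD_eq_getElem _ (0 : Int) hc0 (by simpa using hclen)]
    simp [hct, hget c hc0 hcN]

lemma models_to_map {N : Int} {f : Int → Int} {xs : List Int} (h : Models N f xs) :
    xs = (PySem.List.pyRange 0 N 1).map f := by
  have hlen : xs.length = (N - 0).toNat := by have := h.1; omega
  apply List.ext_getElem
  · simp [PySem.List.length_pyRange_one, hlen]
  · intro k h1 h2
    rw [List.getElem_map, PySem.List.getElem_pyRange_one]
    have hk : ((k : Int)) < N := by omega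
    have := h.2 (k : Int) (by positivity) hk
    rw [PySem.List.pyGetD_eq_getElem _ _ (by positivity) (by omega)] at this
    simpa using this

-- the per-cell gather value both programs end up computing
def gT (mtx : List Int) (rows cols c : Int) : Int :=
  PySem.List.pyGetD mtx c 0
  + (if 0 < PySem.Int.floordiv c cols then PySem.List.pyGetD mtx (c - cols) 0 else 0)
  + (if PySem.Int.floordiv c cols < rows - 1 then PySem.List.pyGetD mtx (c + cols) 0 else 0)
  + (if 0 < PySem.Int.mod c cols then PySem.List.pyGetD mtx (c - 1) 0 else 0)
  + (if PySem.Int.mod c cols < cols - 1 then PySem.List.pyGetD mtx (c + 1) 0 else 0)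

def gK (rows cols c : Int) : Int :=
  1 + (if 0 < PySem.Int.floordiv c cols then 1 else 0)
    + (if PySem.Int.floordiv c cols < rows - 1 then 1 else 0)
    + (if 0 < PySem.Int.mod c cols then 1 else 0)
    + (if PySem.Int.mod c cols < cols - 1 then 1 else 0)

-- ===== A-side: the gather loop fills the output cell by cell =====
lemma dirs_fold_eq (mtx : List Int) (rows cols i j : Int) (hc : 0 < cols)
    (hi0 : 0 ≤ i) (hir : i < rows) (hj0 : 0 ≤ j) (hjc : j < cols) :
    ([((-1 : Int), (0 : Int)), (1, 0), (0, -1), (0, 1)]).foldl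
      (fun (tc : Int × Int) d =>
        let ni := i + d.1
        let nj := j + d.2
        if 0 ≤ ni ∧ ni < rows ∧ 0 ≤ nj ∧ nj < cols then
          (tc.1 + PySem.List.pyGetD mtx (ni * cols + nj) 0, tc.2 + 1)
        else tc)
      (PySem.List.pyGetD mtx (i * cols + j) 0, 1)
    = (gT mtx rows cols (i * cols + j), gK rows cols (i * cols + j)) := by
  obtain ⟨hfd, hmd⟩ := fd_rowcol cols i j hc hj0 hjc
  simp only [List.foldl, gT, gK, hfd, hmd]
  have c1 : (0 ≤ i + -1 ∧ i + -1 < rows ∧ 0 ≤ j + 0 ∧ j + 0 < cols) ↔ (0 < i) := by omega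
  have c2 : (0 ≤ i + 1 ∧ i + 1 < rows ∧ 0 ≤ j + 0 ∧ j + 0 < cols) ↔ (i < rows - 1) := by omega
  have c3 : (0 ≤ i + 0 ∧ i + 0 < rows ∧ 0 ≤ j + -1 ∧ j + -1 < cols) ↔ (0 < j) := by omega
  have c4 : (0 ≤ i + 0 ∧ i + 0 < rows ∧ 0 ≤ j + 1 ∧ j + 1 < cols) ↔ (j < cols - 1) := by omega
  have e1 : (i + -1) * cols + (j + 0) = i * cols + j - cols := by ring
  have e2 : (i + 1) * cols + (j + 0) = i * cols + j + cols := by ring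
  have e3 : (i + 0) * cols + (j + -1) = i * cols + j - 1 := by ring
  have e4 : (i + 0) * cols + (j + 1) = i * cols + j + 1 := by ring
  simp only [c1, c2, c3, c4, e1, e2, e3, e4]
  split_ifs <;> simp

def stepA (mtx : List Int) (rows cols : Int) (sm : List Int) (i j : Int) : List Int :=
  let tc :=
    ([((-1 : Int), (0 : Int)), (1, 0), (0, -1), (0, 1)]).foldl
      (fun (tc : Int × Int) d =>
        let ni := i + d.1
        let nj := j + d.2
        if 0 ≤ ni ∧ ni < rows ∧ 0 ≤ nj ∧ nj < cols then
          (tc.1 + PySem.List.pyGetD mtx (ni * cols + nj) 0, tc.2 + 1)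
        else tc)
      (PySem.List.pyGetD mtx (i * cols + j) 0, 1)
  PySem.List.pySetD sm (i * cols + j) (PySem.Int.floordiv tc.1 tc.2)

lemma A_models (mtx : List Int) (rows cols : Int) (hc : 0 < cols) (hr : 0 ≤ rows)
    (hlen : rows * cols ≤ (mtx.length : Int)) :
    ∀ (P : Nat), (P : Int) ≤ rows * cols →
      Models (rows * cols)
        (fun c => if c < (P : Int) then PySem.Int.floordiv (gT mtx rows cols c) (gK rows cols c) else 0)
        ((PySem.List.pyRange 0 P 1).foldl
          (fun sm s => stepA mtx rows cols sm (PySem.Int.floordiv s cols) (PySem.Int.mod s cols))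
          (List.replicate (rows.toNat * cols.toNat) 0)) := by
  intro P
  induction P with
  | zero =>
    intro _
    simp only [Nat.cast_zero, PySem.List.pyRange_one_eq_nil (le_refl (0 : Int)), List.foldl_nil]
    have hrep : (((List.replicate (rows.toNat * cols.toNat) (0 : Int)).length : Nat) : Int) = rows * cols := by
      rw [List.length_replicate]; push_cast [Int.toNat_of_nonneg hr, Int.toNat_of_nonneg hc.le]; ring
    constructor
    · exact hrep
    · intro c h0 h1
      have hcl : c < ((List.replicate (rows.toNat * cols.toNat) (0 : Int)).length : Int) := by
        rw [hrep]; exact h1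
      rw [PySem.List.pyGetD_eq_getElem _ _ h0 hcl]
      simp
      omega
  | succ n ih =>
    intro hP
    have hn : ((n : Int)) ≤ rows * cols := by push_cast at hP ⊢; omega
    have e1 : ((n + 1 : Nat) : Int) = (n : Int) + 1 := by push_cast; ring
    rw [e1, PySem.List.pyRange_one_succ_right (by positivity), List.foldl_append]
    have hm := ih hn
    set i := PySem.Int.floordiv (n : Int) cols with hi
    set j := PySem.Int.mod (n : Int) cols with hj
    obtain ⟨h4, h5, h1, h2, h3⟩ := src_facts rows cols (n : Int) hc (by positivity) (by push_cast at hP; omega)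
    simp only [List.foldl]
    unfold stepA
    rw [dirs_fold_eq mtx rows cols i j hc h4 h5 h1 h2, h3]
    have hnN : ((n : Int)) < rows * cols := by push_cast at hP; omega
    have hset := models_set hm ((n : Int)) (PySem.Int.floordiv (gT mtx rows cols (n : Int)) (gK rows cols (n : Int))) (by positivity) hnN
    refine models_congr hset ?_
    intro c h0 h1'
    by_cases hcP : c = (n : Int)
    · simp [hcP]
    · have hlt : (c < (n : Int) + 1) ↔ (c < (n : Int)) := by omega
      simp [hcP, hlt]

lemma A_eq_map (mtx : List Int) (rows cols : Int) (hc : 0 < cols) (hr : 0 ≤ rows)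
    (hlen : rows * cols ≤ (mtx.length : Int)) :
    smooth2 mtx rows cols
    = (PySem.List.pyRange 0 (rows * cols) 1).map
        (fun c => PySem.Int.floordiv (gT mtx rows cols c) (gK rows cols c)) := by
  have h1 : smooth2 mtx rows cols
      = (PySem.List.pyRange 0 (rows * cols) 1).foldl
          (fun sm s => stepA mtx rows cols sm (PySem.Int.floordiv s cols) (PySem.Int.mod s cols))
          (List.replicate (rows.toNat * cols.toNat) 0) := by
    unfold smooth2
    exact nested_foldl_linear rows cols hr hc.le (stepA mtx rows cols) _
  rw [h1]
  have hNn : (((rows * cols).toNat : Int)) = rows * cols := Int.toNat_of_nonneg (by positivity)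
  have hm := A_models mtx rows cols hc hr hlen (rows * cols).toNat (le_of_eq hNn)
  rw [hNn] at hm
  refine models_to_map (models_congr hm ?_)
  intro c h0 h1
  simp [h1]

-- ===== B-side: the scatter pass maintains partial sums/counts =====
def scat (rows cols : Int) (w : Int → Int) (p c : Int) : Int :=
  (if 0 < PySem.Int.floordiv c cols ∧ c - cols < p then w (c - cols) else 0)
  + (if PySem.Int.floordiv c cols < rows - 1 ∧ c + cols < p then w (c + cols) else 0)
  + (if 0 < PySem.Int.mod c cols ∧ c - 1 < p then w (c - 1) else 0)
  + (if PySem.Int.mod c cols < cols - 1 ∧ c + 1 < p then w (c + 1) else 0)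

def pT (mtx : List Int) (rows cols p c : Int) : Int :=
  PySem.List.pyGetD mtx c 0 + scat rows cols (fun s => PySem.List.pyGetD mtx s 0) p c

def pK (rows cols p c : Int) : Int :=
  1 + scat rows cols (fun _ => (1 : Int)) p c

lemma ite_add_form (A : Prop) [Decidable A] (x v : Int) :
    (if A then x + v else x) = x + (if A then v else 0) := by split_ifs <;> ring

lemma ite_or_split (A B C : Prop) [Decidable A] [Decidable B] [Decidable C] (x : Int)
    (h : ¬(B ∧ C)) :
    (if A ∧ (B ∨ C) then x else 0) = (if A ∧ B then x else 0) + (if A ∧ C then x else 0) := by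
  by_cases hB : B
  · have hC : ¬C := fun hC => h ⟨hB, hC⟩
    simp [hB, hC]
  · simp [hB]

lemma scat_succ (rows cols p c : Int) (w : Int → Int) :
    scat rows cols w (p + 1) c = scat rows cols w p c
      + (if 0 < PySem.Int.floordiv c cols ∧ c - cols = p then w (c - cols) else 0)
      + (if PySem.Int.floordiv c cols < rows - 1 ∧ c + cols = p then w (c + cols) else 0)
      + (if 0 < PySem.Int.mod c cols ∧ c - 1 = p then w (c - 1) else 0)
      + (if PySem.Int.mod c cols < cols - 1 ∧ c + 1 = p then w (c + 1) else 0) := by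
  unfold scat
  have hlt : ∀ X : Int, (X < p + 1) ↔ (X < p ∨ X = p) := by omega
  simp only [hlt]
  rw [ite_or_split _ _ _ _ (by omega), ite_or_split _ _ _ _ (by omega),
      ite_or_split _ _ _ _ (by omega), ite_or_split _ _ _ _ (by omega)]
  ring

lemma scat_step (rows cols i j ci cj u : Int) (w : Int → Int) (hc : 0 < cols)
    (hi : 0 ≤ i) (hir : i < rows) (hj : 0 ≤ j) (hjc : j < cols)
    (hci : 0 ≤ ci) (hcir : ci < rows) (hcj : 0 ≤ cj) (hcjc : cj < cols) :
    u + scat rows cols w (i * cols + j) (ci * cols + cj)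
      + (if 0 < i ∧ ci * cols + cj = i * cols + j - cols then w (i * cols + j) else 0)
      + (if i < rows - 1 ∧ ci * cols + cj = i * cols + j + cols then w (i * cols + j) else 0)
      + (if 0 < j ∧ ci * cols + cj = i * cols + j - 1 then w (i * cols + j) else 0)
      + (if j < cols - 1 ∧ ci * cols + cj = i * cols + j + 1 then w (i * cols + j) else 0)
    = u + scat rows cols w (i * cols + j + 1) (ci * cols + cj) := by
  obtain ⟨hfd, hmd⟩ := fd_rowcol cols ci cj hc hcj hcjc
  rw [scat_succ, hfd, hmd]
  have eq1 : (if 0 < i ∧ ci * cols + cj = i * cols + j - cols then w (i * cols + j) else 0)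
      = (if ci < rows - 1 ∧ ci * cols + cj + cols = i * cols + j then w (ci * cols + cj + cols) else 0) := by
    by_cases h : ci * cols + cj = i * cols + j - cols
    · have h' : ci * cols + cj = (i - 1) * cols + j := by rw [h]; ring
      obtain ⟨ea, eb⟩ := rowcol_inj cols ci (i - 1) cj j hc hcj hcjc hj hjc h'
      rw [if_pos ⟨by omega, h⟩, if_pos ⟨by omega, by omega⟩,
          show ci * cols + cj + cols = i * cols + j from by omega]
    · rw [if_neg (by tauto), if_neg (by rintro ⟨g1, g2⟩; exact h (by omega))]
  have eq2 : (if i < rows - 1 ∧ ci * cols + cj = i * cols + j + cols then w (i * cols + j) else 0)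
      = (if 0 < ci ∧ ci * cols + cj - cols = i * cols + j then w (ci * cols + cj - cols) else 0) := by
    by_cases h : ci * cols + cj = i * cols + j + cols
    · have h' : ci * cols + cj = (i + 1) * cols + j := by rw [h]; ring
      obtain ⟨ea, eb⟩ := rowcol_inj cols ci (i + 1) cj j hc hcj hcjc hj hjc h'
      rw [if_pos ⟨by omega, h⟩, if_pos ⟨by omega, by omega⟩,
          show ci * cols + cj - cols = i * cols + j from by omega]
    · rw [if_neg (by tauto), if_neg (by rintro ⟨g1, g2⟩; exact h (by omega))]
  have eq3 : (if 0 < j ∧ ci * cols + cj = i * cols + j - 1 then w (i * cols + j) else 0)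
      = (if cj < cols - 1 ∧ ci * cols + cj + 1 = i * cols + j then w (ci * cols + cj + 1) else 0) := by
    by_cases h : 0 < j ∧ ci * cols + cj = i * cols + j - 1
    · obtain ⟨hj0, h⟩ := h
      have h' : ci * cols + cj = i * cols + (j - 1) := by rw [h]; ring
      obtain ⟨ea, eb⟩ := rowcol_inj cols ci i cj (j - 1) hc hcj hcjc (by omega) (by omega) h'
      rw [if_pos ⟨hj0, h⟩, if_pos ⟨by omega, by omega⟩,
          show ci * cols + cj + 1 = i * cols + j from by omega]
    · rw [if_neg h, if_neg ?_]
      rintro ⟨g1, g2⟩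
      have h' : ci * cols + (cj + 1) = i * cols + j := by rw [← g2]; ring
      obtain ⟨ea, eb⟩ := rowcol_inj cols ci i (cj + 1) j hc (by omega) (by omega) hj hjc h'
      exact h ⟨by omega, by omega⟩
  have eq4 : (if j < cols - 1 ∧ ci * cols + cj = i * cols + j + 1 then w (i * cols + j) else 0)
      = (if 0 < cj ∧ ci * cols + cj - 1 = i * cols + j then w (ci * cols + cj - 1) else 0) := by
    by_cases h : j < cols - 1 ∧ ci * cols + cj = i * cols + j + 1
    · obtain ⟨hj1, h⟩ := h
      have h' : ci * cols + cj = i * cols + (j + 1) := by rw [h]; ring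
      obtain ⟨ea, eb⟩ := rowcol_inj cols ci i cj (j + 1) hc hcj hcjc (by omega) (by omega) h'
      rw [if_pos ⟨hj1, h⟩, if_pos ⟨by omega, by omega⟩,
          show ci * cols + cj - 1 = i * cols + j from by omega]
    · rw [if_neg h, if_neg ?_]
      rintro ⟨g1, g2⟩
      have h' : ci * cols + (cj - 1) = i * cols + j := by rw [← g2]; ring
      obtain ⟨ea, eb⟩ := rowcol_inj cols ci i (cj - 1) j hc (by omega) (by omega) hj hjc h'
      exact h ⟨by omega, by omega⟩
  rw [eq1, eq2, eq3, eq4]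
  ring

lemma models_cbump {N : Int} {f g : Int → Int} {st : List Int × List Int}
    (hf : Models N f st.1) (hg : Models N g st.2) (G : Prop) [Decidable G] (t v : Int)
    (ht : G → 0 ≤ t ∧ t < N) :
    Models N (fun c => if G ∧ c = t then f c + v else f c) (if G then pvBump st t v else st).1 ∧
    Models N (fun c => if G ∧ c = t then g c + 1 else g c) (if G then pvBump st t v else st).2 := by
  by_cases hG : G
  · obtain ⟨ht0, htN⟩ := ht hG
    simp only [hG, if_true, true_and]
    have h1 := models_set hf t (PySem.List.pyGetD st.1 t 0 + v) ht0 htN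
    have h2 := models_set hg t (PySem.List.pyGetD st.2 t 0 + 1) ht0 htN
    have hft := hf.2 t ht0 htN
    have hgt := hg.2 t ht0 htN
    constructor
    · refine models_congr h1 ?_
      intro c h0 h1'
      by_cases hct : c = t <;> simp [hct, hft]
    · refine models_congr h2 ?_
      intro c h0 h1'
      by_cases hct : c = t <;> simp [hct, hgt]
  · simp only [hG, if_false, false_and]
    exact ⟨models_congr hf (by intro c _ _; rfl), models_congr hg (by intro c _ _; rfl)⟩

def stepB (mtx : List Int) (rows cols : Int) (st : List Int × List Int) (i j : Int) : List Int × List Int :=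
  let c := i * cols + j
  let v := PySem.List.pyGetD mtx c 0
  let st := if i > 0 then pvBump st (c - cols) v else st
  let st := if i < rows - 1 then pvBump st (c + cols) v else st
  let st := if j > 0 then pvBump st (c - 1) v else st
  let st := if j < cols - 1 then pvBump st (c + 1) v else st
  st

lemma B_step (mtx : List Int) (rows cols i j : Int) (hc : 0 < cols)
    (hi : 0 ≤ i) (hir : i < rows) (hj : 0 ≤ j) (hjc : j < cols)
    (st : List Int × List Int)
    (hf : Models (rows * cols) (pT mtx rows cols (i * cols + j)) st.1)
    (hg : Models (rows * cols) (pK rows cols (i * cols + j)) st.2) :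
    Models (rows * cols) (pT mtx rows cols (i * cols + j + 1)) (stepB mtx rows cols st i j).1 ∧
    Models (rows * cols) (pK rows cols (i * cols + j + 1)) (stepB mtx rows cols st i j).2 := by
  have hPN : i * cols + j < rows * cols := by nlinarith
  have h1 := models_cbump hf hg (i > 0) (i * cols + j - cols) (PySem.List.pyGetD mtx (i * cols + j) 0)
    (by intro hG; constructor <;> nlinarith)
  have h2 := models_cbump h1.1 h1.2 (i < rows - 1) (i * cols + j + cols) (PySem.List.pyGetD mtx (i * cols + j) 0)
    (by intro hG; constructor <;> nlinarith)
  have h3 := models_cbump h2.1 h2.2 (j > 0) (i * cols + j - 1) (PySem.List.pyGetD mtx (i * cols + j) 0)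
    (by intro hG; constructor <;> nlinarith)
  have h4 := models_cbump h3.1 h3.2 (j < cols - 1) (i * cols + j + 1) (PySem.List.pyGetD mtx (i * cols + j) 0)
    (by intro hG; constructor <;> nlinarith)
  refine ⟨models_congr h4.1 ?_, models_congr h4.2 ?_⟩
  · intro c' h0 hN'
    obtain ⟨g1, g2, g3, g4, g5⟩ := src_facts rows cols c' hc h0 hN'
    simp only [ite_add_form, pT]
    rw [← g5]
    exact scat_step rows cols i j _ _ _ _ hc hi hir hj hjc g1 g2 g3 g4
  · intro c' h0 hN'
    obtain ⟨g1, g2, g3, g4, g5⟩ := src_facts rows cols c' hc h0 hN'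
    simp only [ite_add_form, pK]
    rw [← g5]
    exact scat_step rows cols i j _ _ _ _ hc hi hir hj hjc g1 g2 g3 g4

lemma scat_zero (rows cols c : Int) (w : Int → Int) (hc : 0 < cols) (h0 : 0 ≤ c)
    (hN : c < rows * cols) : scat rows cols w 0 c = 0 := by
  obtain ⟨g1, g2, g3, g4, g5⟩ := src_facts rows cols c hc h0 hN
  unfold scat
  rw [if_neg, if_neg, if_neg, if_neg]
  · ring
  · rintro ⟨a, b⟩; omega
  · rintro ⟨a, b⟩; nlinarith
  · rintro ⟨a, b⟩; omega
  · rintro ⟨a, b⟩; nlinarith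

lemma scat_full (rows cols c : Int) (w : Int → Int) (hc : 0 < cols) (h0 : 0 ≤ c)
    (hN : c < rows * cols) :
    scat rows cols w (rows * cols) c
    = (if 0 < PySem.Int.floordiv c cols then w (c - cols) else 0)
      + (if PySem.Int.floordiv c cols < rows - 1 then w (c + cols) else 0)
      + (if 0 < PySem.Int.mod c cols then w (c - 1) else 0)
      + (if PySem.Int.mod c cols < cols - 1 then w (c + 1) else 0) := by
  obtain ⟨g1, g2, g3, g4, g5⟩ := src_facts rows cols c hc h0 hN
  unfold scat
  have e1 : (0 < PySem.Int.floordiv c cols ∧ c - cols < rows * cols) ↔ 0 < PySem.Int.floordiv c cols := by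
    constructor
    · rintro ⟨a, _⟩; exact a
    · intro a; exact ⟨a, by omega⟩
  have e2 : (PySem.Int.floordiv c cols < rows - 1 ∧ c + cols < rows * cols) ↔ PySem.Int.floordiv c cols < rows - 1 := by
    constructor
    · rintro ⟨a, _⟩; exact a
    · intro a; refine ⟨a, ?_⟩; nlinarith
  have e3 : (0 < PySem.Int.mod c cols ∧ c - 1 < rows * cols) ↔ 0 < PySem.Int.mod c cols := by
    constructor
    · rintro ⟨a, _⟩; exact a
    · intro a; exact ⟨a, by omega⟩
  have e4 : (PySem.Int.mod c cols < cols - 1 ∧ c + 1 < rows * cols) ↔ PySem.Int.mod c cols < cols - 1 := by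
    constructor
    · rintro ⟨a, _⟩; exact a
    · intro a; refine ⟨a, ?_⟩; nlinarith
  simp only [e1, e2, e3, e4]

lemma pT_full (mtx : List Int) (rows cols c : Int) (hc : 0 < cols) (h0 : 0 ≤ c)
    (hN : c < rows * cols) : pT mtx rows cols (rows * cols) c = gT mtx rows cols c := by
  unfold pT gT
  rw [scat_full rows cols c _ hc h0 hN]
  ring

lemma pK_full (rows cols c : Int) (hc : 0 < cols) (h0 : 0 ≤ c)
    (hN : c < rows * cols) : pK rows cols (rows * cols) c = gK rows cols c := by
  unfold pK gK
  rw [scat_full rows cols c _ hc h0 hN]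
  ring

lemma flat_rows {α : Type} (rows cols : Int) (hr : 0 ≤ rows) (hc : 0 < cols) (f : Int → α) :
    (PySem.List.pyRange 0 rows 1).flatMap
      (fun i => (PySem.List.pyRange 0 cols 1).map (fun j => f (i * cols + j)))
    = (PySem.List.pyRange 0 (rows * cols) 1).map f := by
  have main : ∀ (Rn : Nat), (Rn : Int) ≤ rows →
      (PySem.List.pyRange 0 Rn 1).flatMap
        (fun i => (PySem.List.pyRange 0 cols 1).map (fun j => f (i * cols + j)))
      = (PySem.List.pyRange 0 ((Rn : Int) * cols) 1).map f := by
    intro Rn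
    induction Rn with
    | zero => simp [PySem.List.pyRange_one_eq_nil (le_refl (0 : Int))]
    | succ n ih =>
      intro hR
      have e1 : ((n + 1 : Nat) : Int) = (n : Int) + 1 := by push_cast; ring
      rw [e1, PySem.List.pyRange_one_succ_right (by omega), List.flatMap_append,
          ih (by push_cast at hR ⊢; omega)]
      have e2 : ((n : Int) + 1) * cols = (n : Int) * cols + cols := by ring
      rw [e2, PySem.List.pyRange_one_append 0 ((n : Int) * cols) ((n : Int) * cols + cols)
            (by positivity) (by omega), List.map_append]
      simp only [List.flatMap_cons, List.flatMap_nil, List.append_nil]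
      congr 1
      rw [PySem.List.pyRange_one 0 cols, PySem.List.pyRange_one ((n : Int) * cols) ((n : Int) * cols + cols)]
      simp only [List.map_map, add_sub_cancel_left, sub_zero]
      apply List.map_congr_left
      intro k _
      simp
  have := main rows.toNat (by omega)
  rw [show ((rows.toNat : Int)) = rows by omega] at this
  exact this

lemma B_models (mtx : List Int) (rows cols : Int) (hc : 0 < cols) (hr : 0 ≤ rows)
    (hlen : rows * cols ≤ (mtx.length : Int)) :
    ∀ (P : Nat), (P : Int) ≤ rows * cols →
      Models (rows * cols) (pT mtx rows cols (P : Int))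
        ((PySem.List.pyRange 0 P 1).foldl
          (fun st s => stepB mtx rows cols st (PySem.Int.floordiv s cols) (PySem.Int.mod s cols))
          ((PySem.List.pyRange 0 (rows * cols) 1).map (fun c => PySem.List.pyGetD mtx c 0),
           List.replicate (rows * cols).toNat 1)).1 ∧
      Models (rows * cols) (pK rows cols (P : Int))
        ((PySem.List.pyRange 0 P 1).foldl
          (fun st s => stepB mtx rows cols st (PySem.Int.floordiv s cols) (PySem.Int.mod s cols))
          ((PySem.List.pyRange 0 (rows * cols) 1).map (fun c => PySem.List.pyGetD mtx c 0),
           List.replicate (rows * cols).toNat 1)).2 := by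
  intro P
  induction P with
  | zero =>
    intro _
    simp only [Nat.cast_zero, PySem.List.pyRange_one_eq_nil (le_refl (0 : Int)), List.foldl_nil]
    constructor
    · constructor
      · simp [PySem.List.length_pyRange_one]
        positivity
      · intro c h0 h1
        rw [PySem.List.pyGetD_map_pyRange_of_nonneg _ _ _ _ h0 h1]
        unfold pT
        rw [scat_zero rows cols c _ hc h0 h1]
        ring
    · constructor
      · simp; omega
      · intro c h0 h1
        have hcl : c < ((List.replicate (rows * cols).toNat (1 : Int)).length : Int) := by
          simp; omega
        rw [PySem.List.pyGetD_eq_getElem _ _ h0 hcl]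
        simp
        unfold pK
        rw [scat_zero rows cols c _ hc h0 h1]
        ring
  | succ n ih =>
    intro hP
    have hn : ((n : Int)) ≤ rows * cols := by push_cast at hP ⊢; omega
    have e1 : ((n + 1 : Nat) : Int) = (n : Int) + 1 := by push_cast; ring
    rw [e1, PySem.List.pyRange_one_succ_right (by positivity), List.foldl_append]
    obtain ⟨ihT, ihK⟩ := ih hn
    obtain ⟨g1, g2, g3, g4, g5⟩ := src_facts rows cols (n : Int) hc (by positivity) (by push_cast at hP; omega)
    simp only [List.foldl]
    set i := PySem.Int.floordiv ((n : Nat) : Int) cols with hi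
    set j := PySem.Int.mod ((n : Nat) : Int) cols with hj
    set st := (PySem.List.pyRange 0 ((n : Nat) : Int) 1).foldl
      (fun st s => stepB mtx rows cols st (PySem.Int.floordiv s cols) (PySem.Int.mod s cols))
      ((PySem.List.pyRange 0 (rows * cols) 1).map (fun c => PySem.List.pyGetD mtx c 0),
       List.replicate (rows * cols).toNat 1) with hst
    rw [← g5] at ihT ihK ⊢
    exact B_step mtx rows cols i j hc g1 g2 g3 g4 st ihT ihK

lemma zipWith_map_same {α β : Type} (f : β → β → α) (g h : Int → β) (l : List Int) :
    List.zipWith f (l.map g) (l.map h) = l.map (fun x => f (g x) (h x)) := by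
  induction l with
  | nil => rfl
  | cons x xs ih => simp [ih]

lemma B_eq_map (mtx : List Int) (rows cols : Int) (hc : 0 < cols) (hr : 0 ≤ rows)
    (hlen : rows * cols ≤ (mtx.length : Int)) :
    smooth2_alt mtx rows cols
    = (PySem.List.pyRange 0 (rows * cols) 1).map
        (fun c => PySem.Int.floordiv (gT mtx rows cols c) (gK rows cols c)) := by
  unfold smooth2_alt
  have hflat : (PySem.List.pyRange 0 rows 1).flatMap
      (fun i => (PySem.List.pyRange 0 cols 1).map (fun j => PySem.List.pyGetD mtx (i * cols + j) 0))
      = (PySem.List.pyRange 0 (rows * cols) 1).map (fun c => PySem.List.pyGetD mtx c 0) :=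
    flat_rows rows cols hr hc (fun c => PySem.List.pyGetD mtx c 0)
  show (List.zipWith (fun t k => PySem.Int.floordiv t k)
      ((PySem.List.pyRange 0 rows 1).foldl
        (fun st i => (PySem.List.pyRange 0 cols 1).foldl (fun st j => stepB mtx rows cols st i j) st)
        ((PySem.List.pyRange 0 rows 1).flatMap
          (fun i => (PySem.List.pyRange 0 cols 1).map (fun j => PySem.List.pyGetD mtx (i * cols + j) 0)),
         List.replicate ((PySem.List.pyRange 0 rows 1).flatMap
          (fun i => (PySem.List.pyRange 0 cols 1).map (fun j => PySem.List.pyGetD mtx (i * cols + j) 0))).length 1)).1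
      ((PySem.List.pyRange 0 rows 1).foldl
        (fun st i => (PySem.List.pyRange 0 cols 1).foldl (fun st j => stepB mtx rows cols st i j) st)
        ((PySem.List.pyRange 0 rows 1).flatMap
          (fun i => (PySem.List.pyRange 0 cols 1).map (fun j => PySem.List.pyGetD mtx (i * cols + j) 0)),
         List.replicate ((PySem.List.pyRange 0 rows 1).flatMap
          (fun i => (PySem.List.pyRange 0 cols 1).map (fun j => PySem.List.pyGetD mtx (i * cols + j) 0))).length 1)).2) = _
  rw [hflat]
  rw [show ((PySem.List.pyRange 0 (rows * cols) 1).map (fun c => PySem.List.pyGetD mtx c 0)).length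
      = (rows * cols).toNat from by simp [PySem.List.length_pyRange_one]]
  rw [nested_foldl_linear rows cols hr hc.le (stepB mtx rows cols)]
  have hNn : (((rows * cols).toNat : Int)) = rows * cols := by
    rw [Int.toNat_of_nonneg (by positivity)]
  obtain ⟨hT, hK⟩ := B_models mtx rows cols hc hr hlen (rows * cols).toNat (by omega)
  rw [hNn] at hT hK
  rw [models_to_map hT, models_to_map hK, zipWith_map_same]
  apply List.map_congr_left
  intro c hm
  rw [PySem.List.mem_pyRange_one] at hm
  rw [pT_full mtx rows cols c hc hm.1 hm.2, pK_full rows cols c hc hm.1 hm.2]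

-- degenerate dimensions: both programs return []
lemma A_rows_nonpos (mtx : List Int) (rows cols : Int) (hr : rows ≤ 0) : smooth2 mtx rows cols = [] := by
  unfold smooth2
  simp [PySem.List.pyRange_one_eq_nil hr, Int.toNat_of_nonpos hr]

lemma A_cols_nonpos (mtx : List Int) (rows cols : Int) (hc : cols ≤ 0) : smooth2 mtx rows cols = [] := by
  unfold smooth2
  simp [PySem.List.pyRange_one_eq_nil hc, Int.toNat_of_nonpos hc]

lemma B_rows_nonpos (mtx : List Int) (rows cols : Int) (hr : rows ≤ 0) : smooth2_alt mtx rows cols = [] := by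
  unfold smooth2_alt
  simp [PySem.List.pyRange_one_eq_nil hr]

lemma B_cols_nonpos (mtx : List Int) (rows cols : Int) (hc : cols ≤ 0) : smooth2_alt mtx rows cols = [] := by
  unfold smooth2_alt
  simp [PySem.List.pyRange_one_eq_nil hc]

-- ===== VERDICT (by name: the statement is the Claim_ definition above) =====
theorem smooth2_spec : Claim_equal_smooth2 := by
  unfold Claim_equal_smooth2
  intro mtx rows cols hdom hpre
  unfold Spec_smooth2
  by_cases hrow : 0 < rows
  · by_cases hcol : 0 < cols
    · have hlen := hpre hrow hcol
      rw [A_eq_map mtx rows cols hcol hrow.le hlen, B_eq_map mtx rows cols hcol hrow.le hlen]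
    · rw [A_cols_nonpos mtx rows cols (by omega), B_cols_nonpos mtx rows cols (by omega)]
  · rw [A_rows_nonpos mtx rows cols (by omega), B_rows_nonpos mtx rows cols (by omega)]
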